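-- pv_equiv track=rewrite | github.com/JunYoungkKwon/Algorithm | programmers/1_level_trainning.py | solution
-- ===== SOURCE A (Python) =====
-- def solution(keymap, targets):
--     answer = []
--     min_touch = {}
--     for keys in keymap:
--         for i, char in enumerate(keys):
--             touch_count = i + 1
--             if char not in min_touch or touch_count < min_touch[char]:
--                 min_touch[char] = touch_count
--     for target in targets:
--         total = 0
--         for char in target:
--             if char in min_touch:
--                 total += min_touch[char]
--             else:
--                 total = -1
--                 break
--         answer.append(total)
--     return answer
-- ===== SOURCE B (Python) =====
-- def solution(keymap, targets):
--     answer = []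
--     for target in targets:
--         total = 0
--         for char in target:
--             best = None
--             for keys in keymap:
--                 for i, c in enumerate(keys):
--                     if c == char and (best is None or i + 1 < best):
--                         best = i + 1
--             if best is None:
--                 total = -1
--                 break
--             total += best
--         answer.append(total)
--     return answer
-- ===== Notes on version B (the rewrite author's own statement) =====
-- stated objective: alternative
-- what changed: B removes A's precomputed min_touch dictionary entirely: for each target character it rescans every keymap string, keeping a running Option minimum of position+1, and breaks to -1 when no occurrence exists.
import Mathlib
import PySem

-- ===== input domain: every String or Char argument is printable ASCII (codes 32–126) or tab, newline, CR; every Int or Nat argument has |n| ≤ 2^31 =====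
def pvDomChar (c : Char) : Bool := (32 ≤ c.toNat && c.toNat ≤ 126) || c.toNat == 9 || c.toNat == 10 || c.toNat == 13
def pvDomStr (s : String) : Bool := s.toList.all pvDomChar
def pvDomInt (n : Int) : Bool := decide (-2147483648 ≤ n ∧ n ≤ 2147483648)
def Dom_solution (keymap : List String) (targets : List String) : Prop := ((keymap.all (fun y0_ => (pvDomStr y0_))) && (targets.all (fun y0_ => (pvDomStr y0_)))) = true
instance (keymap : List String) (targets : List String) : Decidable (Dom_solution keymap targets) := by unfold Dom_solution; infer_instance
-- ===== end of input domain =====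

-- B drops A's precomputed min_touch dict and rescans keymap per target character (alternative decomposition, same results).

-- ===== PORT A =====
-- one step of A's dict-building inner loop: if char not in min_touch or touch_count < min_touch[char]
def solnStepA (d : PySem.Dict Char Int) (ic : Int × Char) : PySem.Dict Char Int :=
  match d.get? ic.2 with
  | none => d.insert ic.2 (ic.1 + 1)
  | some v => if ic.1 + 1 < v then d.insert ic.2 (ic.1 + 1) else d

-- A's 'for char in target' loop with its break
def solnTgtA (d : PySem.Dict Char Int) (total : Int) : List Char → Int
  | [] => total
  | c :: cs =>
    match d.get? c with
    | some v => solnTgtA d (total + v) cs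
    | none => -1

def solution (keymap : List String) (targets : List String) : List Int :=
  let minTouch := keymap.foldl
    (fun d keys => (PySem.List.enumerate keys.toList 0).foldl solnStepA d)
    PySem.Dict.empty
  targets.foldl (fun answer target => answer ++ [solnTgtA minTouch 0 target.toList]) []

-- ===== PORT B =====
-- one step of B's 'for i, c in enumerate(keys)' scan for the character ch
def solnStepB (ch : Char) (best : Option Int) (ic : Int × Char) : Option Int :=
  if ic.2 == ch && (best.elim true (fun b => decide (ic.1 + 1 < b))) then some (ic.1 + 1) else best

-- B's per-character rescan of the whole keymap
def solnBest (keymap : List String) (ch : Char) : Option Int :=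
  keymap.foldl (fun best keys => (PySem.List.enumerate keys.toList 0).foldl (solnStepB ch) best) none

-- B's 'for char in target' loop with its break
def solnTgtB (keymap : List String) (total : Int) : List Char → Int
  | [] => total
  | c :: cs =>
    match solnBest keymap c with
    | some v => solnTgtB keymap (total + v) cs
    | none => -1

def solution_alt (keymap : List String) (targets : List String) : List Int :=
  targets.foldl (fun answer target => answer ++ [solnTgtB keymap 0 target.toList]) []

-- ===== PRECONDITION & SPEC =====
def Spec_solution (keymap : List String) (targets : List String) (out : List Int) : Prop := out = solution_alt keymap targets
instance (keymap : List String) (targets : List String) (out : List Int) : Decidable (Spec_solution keymap targets out) := by unfold Spec_solution; infer_instance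

-- ===== CLAIM (what is proved, stated in full; the proofs are below) =====
def Claim_equal_solution : Prop := ∀ (keymap : List String) (targets : List String), Dom_solution keymap targets → Spec_solution keymap targets (solution keymap targets)

-- ===== LEMMAS AND PROOFS =====

-- A's dict update and B's running minimum agree step by step
theorem soln_step_get (d : PySem.Dict Char Int) (ic : Int × Char) (ch : Char) :
    (solnStepA d ic).get? ch = solnStepB ch (d.get? ch) ic := by
  unfold solnStepA solnStepB
  by_cases hc : ic.2 = ch
  · subst hc
    cases h : d.get? ic.2 with
    | none => simp [PySem.Dict.get?_insert_self]
    | some v =>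
      simp only [Option.elim]
      by_cases hlt : ic.1 + 1 < v
      · simp [hlt, PySem.Dict.get?_insert_self]
      · simp [hlt, h]
  · cases h : d.get? ic.2 with
    | none => simp [PySem.Dict.get?_insert, Ne.symm hc, beq_iff_eq, hc]
    | some v =>
      by_cases hlt : ic.1 + 1 < v
      · simp [hlt, PySem.Dict.get?_insert, Ne.symm hc, beq_iff_eq, hc]
      · simp [hlt, beq_iff_eq, hc]

theorem soln_inner_get (l : List (Int × Char)) (d : PySem.Dict Char Int) (ch : Char) :
    (l.foldl solnStepA d).get? ch = l.foldl (solnStepB ch) (d.get? ch) := by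
  induction l generalizing d with
  | nil => rfl
  | cons p tl ih => simp only [List.foldl_cons, ih, soln_step_get]

theorem soln_outer_get (km : List String) (d : PySem.Dict Char Int) (ch : Char) :
    (km.foldl (fun d keys => (PySem.List.enumerate keys.toList 0).foldl solnStepA d) d).get? ch
      = km.foldl (fun best keys => (PySem.List.enumerate keys.toList 0).foldl (solnStepB ch) best) (d.get? ch) := by
  induction km generalizing d with
  | nil => rfl
  | cons keys tl ih => simp only [List.foldl_cons, ih, soln_inner_get]

theorem soln_dict_eq_best (km : List String) (ch : Char) :
    (km.foldl (fun d keys => (PySem.List.enumerate keys.toList 0).foldl solnStepA d) PySem.Dict.empty).get? ch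
      = solnBest km ch := by
  rw [soln_outer_get]; rfl

theorem soln_tgt_eq (km : List String) (total : Int) (cs : List Char) :
    solnTgtA (km.foldl (fun d keys => (PySem.List.enumerate keys.toList 0).foldl solnStepA d) PySem.Dict.empty) total cs
      = solnTgtB km total cs := by
  induction cs generalizing total with
  | nil => rfl
  | cons c tl ih =>
    unfold solnTgtA solnTgtB
    rw [soln_dict_eq_best]
    cases solnBest km c with
    | none => rfl
    | some v => exact ih (total + v)

-- ===== VERDICT (by name: the statement is the Claim_ definition above) =====
theorem solution_spec : Claim_equal_solution := by
  intro keymap targets _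
  unfold Spec_solution solution solution_alt
  simp only [soln_tgt_eq]
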